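-- pv_equiv track=rewrite | github.com/maxbergmark/old-work | Egna projekt/Words/ordlista.py | lettercheck
-- ===== SOURCE A (Python) =====
-- def lettercheck(word):
--     vokal = False
--     konsonant = False
--     vokaler = ['a', 'e', 'i', 'o', 'u']
--     konsonanter = ['b', 'c', 'd', 'f', 'g', 'h', 'j', 'k', 'l', 'm', 'n', 'p', 'q', 'r', 's', 't', 'v', 'w', 'x', 'y', 'z']
--     for letter in range(len(word)):
--         if word[letter] in vokaler:
--             vokal = True
--         if word[letter] in konsonanter:
--             konsonant = True
--     return vokal and konsonant
-- ===== SOURCE B (Python) =====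
-- def lettercheck(word):
--     chars = set(word)
--     return bool(chars & set('aeiou')) and bool(chars & set('bcdfghjklmnpqrstvwxyz'))
-- ===== Notes on version B (the rewrite author's own statement) =====
-- stated objective: simpler
-- what changed: Replaces the index loop flipping two flags with building the set of distinct characters once and testing non-emptiness of its intersections with the vowel and consonant sets; no explicit loop remains.
import Mathlib
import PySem

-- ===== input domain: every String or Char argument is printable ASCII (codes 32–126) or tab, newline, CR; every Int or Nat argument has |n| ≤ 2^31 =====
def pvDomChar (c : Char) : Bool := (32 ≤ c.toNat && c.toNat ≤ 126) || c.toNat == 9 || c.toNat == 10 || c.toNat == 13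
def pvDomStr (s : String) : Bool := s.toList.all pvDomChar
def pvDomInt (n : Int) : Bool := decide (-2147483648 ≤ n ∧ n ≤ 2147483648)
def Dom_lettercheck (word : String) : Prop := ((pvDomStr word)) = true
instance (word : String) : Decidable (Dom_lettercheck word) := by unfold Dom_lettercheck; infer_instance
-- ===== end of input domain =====

-- B replaces A's index loop and two boolean flags by one deduplicated character set
-- intersected with the vowel and consonant sets (objective: simpler).


-- ===== PORT A =====
def lettercheck (word : String) : Bool :=
  let vokaler : List Char := ['a', 'e', 'i', 'o', 'u']
  let konsonanter : List Char := ['b', 'c', 'd', 'f', 'g', 'h', 'j', 'k', 'l', 'm',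
    'n', 'p', 'q', 'r', 's', 't', 'v', 'w', 'x', 'y', 'z']
  -- for letter in range(len(word)): word[letter] is always in range, so pyGetD's default is never used
  let st := (PySem.List.pyRange 0 (word.toList.length : Int) 1).foldl
    (fun (st : Bool × Bool) j =>
      let c := PySem.List.pyGetD word.toList j ' '
      (if vokaler.contains c then true else st.1,
       if konsonanter.contains c then true else st.2))
    (false, false)
  st.1 && st.2

-- ===== PORT B =====
def lettercheck_alt (word : String) : Bool :=
  let chars := PySem.Set.ofList word.toList
  !(PySem.Set.inter chars (PySem.Set.ofList "aeiou".toList)).isEmpty &&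
  !(PySem.Set.inter chars (PySem.Set.ofList "bcdfghjklmnpqrstvwxyz".toList)).isEmpty

-- ===== PRECONDITION & SPEC =====
def Spec_lettercheck (word : String) (out : Bool) : Prop := out = lettercheck_alt word
instance (word : String) (out : Bool) : Decidable (Spec_lettercheck word out) := by unfold Spec_lettercheck; infer_instance

-- ===== CLAIM (what is proved, stated in full; the proofs are below) =====
def Claim_equal_lettercheck : Prop := ∀ (word : String), Dom_lettercheck word → Spec_lettercheck word (lettercheck word)

-- ===== LEMMAS AND PROOFS =====

theorem lettercheck_loop (V K : List Char) (L : List Char) (a b : Bool) :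
    L.foldl (fun (st : Bool × Bool) c =>
      (if V.contains c then true else st.1,
       if K.contains c then true else st.2)) (a, b)
    = (a || L.any V.contains, b || L.any K.contains) := by
  induction L generalizing a b with
  | nil => simp
  | cons c L ih =>
    simp only [List.foldl_cons, List.any_cons, ih]
    cases hV : V.contains c <;> cases hK : K.contains c <;> simp

theorem inter_nonempty (L S : List Char) :
    (!(PySem.Set.inter (PySem.Set.ofList L) S).isEmpty) = L.any S.contains := by
  rcases h : L.any S.contains with _ | _ <;>
    simp_all [List.isEmpty_iff, List.eq_nil_iff_forall_not_mem, List.any_eq_true,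
      PySem.Set.mem_inter, PySem.Set.mem_ofList]

-- ===== VERDICT (by name: the statement is the Claim_ definition above) =====
theorem lettercheck_spec : Claim_equal_lettercheck := by
  intro word _
  unfold Spec_lettercheck lettercheck lettercheck_alt
  simp only []
  rw [PySem.List.foldl_pyRange_pyGetD' word.toList ' '
    (fun (st : Bool × Bool) c =>
      (if (['a', 'e', 'i', 'o', 'u'] : List Char).contains c then true else st.1,
       if (['b', 'c', 'd', 'f', 'g', 'h', 'j', 'k', 'l', 'm', 'n', 'p', 'q', 'r', 's', 't',
            'v', 'w', 'x', 'y', 'z'] : List Char).contains c then true else st.2))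
    (false, false) (by norm_num)]
  simp only [Int.toNat_zero, List.drop_zero, lettercheck_loop, Bool.false_or, inter_nonempty]
  rw [show PySem.Set.ofList "aeiou".toList = ['a', 'e', 'i', 'o', 'u'] from rfl,
    show PySem.Set.ofList "bcdfghjklmnpqrstvwxyz".toList =
      ['b', 'c', 'd', 'f', 'g', 'h', 'j', 'k', 'l', 'm', 'n', 'p', 'q', 'r', 's', 't',
       'v', 'w', 'x', 'y', 'z'] from rfl]
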